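-- pv_equiv track=rewrite | github.com/ttk1010/othello_ai | othello_utils.py | move_stone
-- ===== SOURCE A (Python) =====
-- def can_place_x_y(board, stone, x, y):
--     """
--     指定位置に石を置けるかチェック
--
--     Args:
--         board: 2次元配列のオセロボード
--         stone: 石の色 (BLACK=1, WHITE=2)
--         x: 列位置
--         y: 行位置
--
--     Returns:
--         bool: 置けるならTrue
--     """
--     if board[y][x] != 0:
--         return False  # 既に石がある場合は置けない
--
--     opponent = 3 - stone  # 相手の石 (1なら2、2なら1)
--     directions = [(-1, -1), (-1, 0), (-1, 1), (0, -1), (0, 1), (1, -1), (1, 0), (1, 1)]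
--
--     for dx, dy in directions:
--         nx, ny = x + dx, y + dy
--         found_opponent = False
--
--         while 0 <= nx < len(board[0]) and 0 <= ny < len(board) and board[ny][nx] == opponent:
--             nx += dx
--             ny += dy
--             found_opponent = True
--
--         if found_opponent and 0 <= nx < len(board[0]) and 0 <= ny < len(board) and board[ny][nx] == stone:
--             return True  # 石を置ける条件を満たす
--
--     return False
--
-- def move_stone(board, stone, x, y):
--     """
--     指定位置に石を置き、相手の石をひっくり返す
--
--     Args:
--         board: 2次元配列のオセロボード（破壊的変更）
--         stone: 石の色 (BLACK=1, WHITE=2)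
--         x: 列位置
--         y: 行位置
--     """
--     moves = [copy(board)]*3
--     if not can_place_x_y(board, stone, x, y):
--         return moves  # 置けない場合は何もしない
--
--     board[y][x] = stone  # 石を置く
--     moves.append(copy(board))
--     opponent = 3 - stone
--     directions = [(-1, -1), (-1, 0), (-1, 1), (0, -1), (0, 1), (1, -1), (1, 0), (1, 1)]
--     flipped_count = 0
--
--     for dx, dy in directions:
--         nx, ny = x + dx, y + dy
--         stones_to_flip = []
--
--         while 0 <= nx < len(board[0]) and 0 <= ny < len(board) and board[ny][nx] == opponent:
--             stones_to_flip.append((nx, ny))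
--             nx += dx
--             ny += dy
--
--         if stones_to_flip and 0 <= nx < len(board[0]) and 0 <= ny < len(board) and board[ny][nx] == stone:
--             for flip_x, flip_y in stones_to_flip:
--                 board[flip_y][flip_x] = stone
--                 moves.append(copy(board))
--                 flipped_count += 1
--
--     return moves
--
-- def copy(board):
--     """
--     ボードのディープコピーを作成
--
--     Args:
--         board: 2次元配列のオセロボード
--
--     Returns:
--         コピーされたボード
--     """
--     return [row[:] for row in board]
-- ===== SOURCE B (Python) =====
-- def copy(board):
--     return [row[:] for row in board]
--
-- def _ray_steps(pos, d, size):
--     # number of in-bounds cells strictly beyond pos along direction d on this axis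
--     if d < 0:
--         return pos
--     if d > 0:
--         return size - 1 - pos
--     return None
--
-- def move_stone(board, stone, x, y):
--     moves = [copy(board)] * 3
--     if board[y][x] != 0:
--         return moves
--     w, h = len(board[0]), len(board)
--     opponent = 3 - stone
--     to_flip = []
--     for dx, dy in [(-1, -1), (-1, 0), (-1, 1), (0, -1), (0, 1), (1, -1), (1, 0), (1, 1)]:
--         limits = [l for l in (_ray_steps(x, dx, w), _ray_steps(y, dy, h)) if l is not None]
--         steps = min(limits)
--         cells = [(x + k * dx, y + k * dy) for k in range(1, steps + 1)]
--         t = 0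
--         while t < len(cells) and board[cells[t][1]][cells[t][0]] == opponent:
--             t += 1
--         if 0 < t < len(cells) and board[cells[t][1]][cells[t][0]] == stone:
--             to_flip.extend(cells[:t])
--     if not to_flip:
--         return moves
--     board[y][x] = stone
--     moves.append(copy(board))
--     for fx, fy in to_flip:
--         board[fy][fx] = stone
--         moves.append(copy(board))
--     return moves
-- ===== Notes on version B (the rewrite author's own statement) =====
-- stated objective: simpler
-- what changed: B drops the separate can_place_x_y pass entirely: one pre-placement scan over the 8 directions (each ray materialised as an explicit coordinate list cut at the board edge) gathers a single flat to_flip list, placeability becomes its non-emptiness, and the flips/snapshots are then replayed in one flat loop instead of A's per-direction rescan-and-flip on the mutated board.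
-- outside the precondition, e.g. on move_stone([[], [0]], -1, -1, -1): A returns [[[], [0]], [[], [0]], [[], [0]]], B raises IndexError
import Mathlib
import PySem

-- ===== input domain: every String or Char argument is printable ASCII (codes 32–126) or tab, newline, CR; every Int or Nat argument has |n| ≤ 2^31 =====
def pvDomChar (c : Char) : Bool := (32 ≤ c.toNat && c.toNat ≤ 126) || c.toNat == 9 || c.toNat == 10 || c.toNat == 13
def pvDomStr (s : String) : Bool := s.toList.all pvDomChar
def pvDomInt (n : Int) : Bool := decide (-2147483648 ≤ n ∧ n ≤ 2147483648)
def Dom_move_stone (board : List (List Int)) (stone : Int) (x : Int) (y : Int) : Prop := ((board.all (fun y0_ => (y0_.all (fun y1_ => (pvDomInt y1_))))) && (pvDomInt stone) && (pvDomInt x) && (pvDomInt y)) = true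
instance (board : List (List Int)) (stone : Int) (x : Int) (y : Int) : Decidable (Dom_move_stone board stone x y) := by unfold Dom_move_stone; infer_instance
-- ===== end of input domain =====

-- B replaces A's can_place_x_y pass + per-direction flip/rescan with ONE pre-placement scan that
-- collects a flat to_flip list (placeability = non-emptiness); equivalence is about the RETURN value
-- (both Pythons mutate `board` in place identically on the admitted inputs).

-- ===== PORT A =====
-- board[j][i] read; guards in the Python always precede in-range reads under Pre_, so a default is safe
def pvCellA (b : List (List Int)) (j i : Int) : Int :=
  PySem.List.pyGetD (PySem.List.pyGetD b j []) i 0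

-- board[j][i] = v (Python index semantics via pySetD; in range wherever the Python assigns)
def pvSetA (b : List (List Int)) (j i : Int) (v : Int) : List (List Int) :=
  PySem.List.pySetD b j (PySem.List.pySetD (PySem.List.pyGetD b j []) i v)

def pvDirs : List (Int × Int) :=
  [(-1, -1), (-1, 0), (-1, 1), (0, -1), (0, 1), (1, -1), (1, 0), (1, 1)]

-- the `while` of can_place_x_y: advance (nx,ny) over opponent stones, tracking found_opponent
def pvWalkCheck (b : List (List Int)) (w h opp dx dy : Int) :
    Int → Int → Bool → Nat → Bool × Int × Int
  | nx, ny, found, 0 => (found, nx, ny)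
  | nx, ny, found, fuel + 1 =>
    if 0 ≤ nx ∧ nx < w ∧ 0 ≤ ny ∧ ny < h ∧ pvCellA b ny nx = opp then
      pvWalkCheck b w h opp dx dy (nx + dx) (ny + dy) true fuel
    else (found, nx, ny)

-- the `while` of move_stone: collect the opponent run, return it with the final (nx,ny)
def pvWalkCollect (b : List (List Int)) (w h opp dx dy : Int) :
    Int → Int → Nat → List (Int × Int) × Int × Int
  | nx, ny, 0 => ([], nx, ny)
  | nx, ny, fuel + 1 =>
    if 0 ≤ nx ∧ nx < w ∧ 0 ≤ ny ∧ ny < h ∧ pvCellA b ny nx = opp then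
      let r := pvWalkCollect b w h opp dx dy (nx + dx) (ny + dy) fuel
      ((nx, ny) :: r.1, r.2)
    else ([], nx, ny)

-- fuel: each while step moves one cell monotonically inside a w×h box, so w+h+2 steps suffice
def pvFuel (b : List (List Int)) : Nat :=
  b.length + (PySem.List.pyGetD b 0 ([] : List Int)).length + 2

def can_place_x_y (board : List (List Int)) (stone : Int) (x : Int) (y : Int) : Bool :=
  if pvCellA board y x ≠ 0 then false
  else
    let opp := 3 - stone
    let w : Int := (PySem.List.pyGetD board 0 ([] : List Int)).length
    let h : Int := board.length
    pvDirs.any (fun d =>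
      let r := pvWalkCheck board w h opp d.1 d.2 (x + d.1) (y + d.2) false (pvFuel board)
      r.1 && decide (0 ≤ r.2.1 ∧ r.2.1 < w ∧ 0 ≤ r.2.2 ∧ r.2.2 < h ∧ pvCellA board r.2.2 r.2.1 = stone))

def move_stone (board : List (List Int)) (stone : Int) (x : Int) (y : Int) :
    List (List (List Int)) :=
  let moves := [board, board, board]
  if ¬ can_place_x_y board stone x y then moves
  else
    let b1 := pvSetA board y x stone
    let moves := moves ++ [b1]
    let opp := 3 - stone
    let res := pvDirs.foldl (fun (st : List (List Int) × List (List (List Int))) d =>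
      let w : Int := (PySem.List.pyGetD st.1 0 ([] : List Int)).length
      let h : Int := st.1.length
      let r := pvWalkCollect st.1 w h opp d.1 d.2 (x + d.1) (y + d.2) (pvFuel st.1)
      if r.1 ≠ [] ∧ 0 ≤ r.2.1 ∧ r.2.1 < w ∧ 0 ≤ r.2.2 ∧ r.2.2 < h ∧
          pvCellA st.1 r.2.2 r.2.1 = stone then
        r.1.foldl (fun st2 p =>
          let b' := pvSetA st2.1 p.2 p.1 stone
          (b', st2.2 ++ [b'])) st
      else st) (b1, moves)
    res.2

-- ===== PORT B =====
def pvCellB (b : List (List Int)) (j i : Int) : Int :=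
  PySem.List.pyGetD (PySem.List.pyGetD b j []) i 0

def pvSetB (b : List (List Int)) (j i : Int) (v : Int) : List (List Int) :=
  PySem.List.pySetD b j (PySem.List.pySetD (PySem.List.pyGetD b j []) i v)

-- in-bounds cells strictly beyond pos along d on one axis (none when d = 0: that axis is no limit)
def pvRayLen (pos d size : Int) : Option Int :=
  if d < 0 then some pos else if d > 0 then some (size - 1 - pos) else none

def pvSteps (x y w h dx dy : Int) : Int :=
  match pvRayLen x dx w, pvRayLen y dy h with
  | some a, some b => min a b
  | some a, none => a
  | none, some b => b
  | none, none => 0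

-- [(x+k*dx, y+k*dy) for k in range(1, steps+1)]
def pvCellsOf (x y dx dy steps : Int) : List (Int × Int) :=
  (PySem.List.pyRange 1 (steps + 1) 1).map (fun k => (x + k * dx, y + k * dy))

-- the counting while-loop of B: length of the leading run of opponent stones
def pvRunLen (b : List (List Int)) (opp : Int) : List (Int × Int) → Nat
  | [] => 0
  | c :: rest => if pvCellB b c.2 c.1 = opp then pvRunLen b opp rest + 1 else 0

def move_stone_alt (board : List (List Int)) (stone : Int) (x : Int) (y : Int) :
    List (List (List Int)) :=
  let moves := [board, board, board]
  if pvCellB board y x ≠ 0 then moves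
  else
    let w : Int := (PySem.List.pyGetD board 0 ([] : List Int)).length
    let h : Int := board.length
    let opp := 3 - stone
    let toFlip := pvDirs.foldl (fun acc d =>
      let cells := pvCellsOf x y d.1 d.2 (pvSteps x y w h d.1 d.2)
      let t := pvRunLen board opp cells
      if 0 < t ∧ t < cells.length ∧
          pvCellB board (cells.getD t (0, 0)).2 (cells.getD t (0, 0)).1 = stone then
        acc ++ cells.take t
      else acc) []
    if toFlip = [] then moves
    else
      let b1 := pvSetB board y x stone
      let res := toFlip.foldl (fun (st : List (List Int) × List (List (List Int))) p =>
        let b' := pvSetB st.1 p.2 p.1 stone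
        (b', st.2 ++ [b'])) (b1, moves ++ [b1])
      res.2

-- ===== PRECONDITION & SPEC =====
-- Pre_ admits every occupied-target input (board[y][x] != 0, any valid Python indices: both
-- programs return the three copies untouched) and, for an empty target, nonempty rectangular boards
-- with 0 ≤ x < width and 0 ≤ y < height.  It excludes: (a) inputs where A raises IndexError (x/y out
-- of Python's index range, ragged rows a scan steps onto); (b) empty-target inputs with negative
-- in-range x/y or ragged rows, on which A may still return — there Python's negative-index
-- wraparound (guard/placement at the wrapped cell, ray scans from the unwrapped coordinates) resp.
-- A's use of len(board[0]) as the width of every row is an accident of the implementation that a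
-- pre-placement scan cannot and should not reproduce.
def Pre_move_stone (board : List (List Int)) (stone : Int) (x : Int) (y : Int) : Prop :=
  PySem.Raise.InRange board.length y ∧
  PySem.Raise.InRange (PySem.List.pyGetD board y []).length x ∧
  (PySem.List.pyGetD (PySem.List.pyGetD board y []) x 0 ≠ 0 ∨
    ((∀ row ∈ board, row.length = (board.headD []).length) ∧
      0 ≤ x ∧ x < ((board.headD []).length : Int) ∧ 0 ≤ y ∧ y < (board.length : Int)))
instance (board : List (List Int)) (stone : Int) (x : Int) (y : Int) :
    Decidable (Pre_move_stone board stone x y) := by unfold Pre_move_stone; infer_instance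

def pvWitness_move_stone : List (List Int) × Int × Int × Int :=
  ([[0, 0, 0, 0], [0, 1, 2, 0], [0, 2, 1, 0], [0, 0, 0, 0]], 1, 3, 1)

def Spec_move_stone (board : List (List Int)) (stone : Int) (x : Int) (y : Int)
    (out : List (List (List Int))) : Prop := out = move_stone_alt board stone x y
instance (board : List (List Int)) (stone : Int) (x : Int) (y : Int)
    (out : List (List (List Int))) : Decidable (Spec_move_stone board stone x y out) := by
  unfold Spec_move_stone; infer_instance

-- ===== CLAIM (what is proved, stated in full; the proofs are below) =====
def Claim_equal_move_stone : Prop := ∀ (board : List (List Int)) (stone : Int) (x : Int) (y : Int), Dom_move_stone board stone x y → Pre_move_stone board stone x y → Spec_move_stone board stone x y (move_stone board stone x y)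


-- ===== LEMMAS AND PROOFS =====

-- shape of a rectangular W×H board (W H as Int for arithmetic)
def pvShape (b : List (List Int)) (W H : Int) : Prop :=
  ((b.length : Int) = H) ∧ ∀ row ∈ b, ((row.length : Int) = W)

-- a valid Othello direction
def pvDirOK (d : Int × Int) : Prop :=
  (d.1 = -1 ∨ d.1 = 0 ∨ d.1 = 1) ∧ (d.2 = -1 ∨ d.2 = 0 ∨ d.2 = 1) ∧ d ≠ (0, 0)

-- p lies on the open ray from (x,y) in direction d
def pvOnRay (x y : Int) (d : Int × Int) (p : Int × Int) : Prop :=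
  ∃ k : Int, 1 ≤ k ∧ p = (x + k * d.1, y + k * d.2)

-- p is inside the W×H board
def pvInB (W H : Int) (p : Int × Int) : Prop := 0 ≤ p.1 ∧ p.1 < W ∧ 0 ≤ p.2 ∧ p.2 < H

-- the board-only flip step and the (board, snapshots) flip step shared by both ports' inner loops
def pvBStep (stone : Int) (b : List (List Int)) (p : Int × Int) : List (List Int) :=
  pvSetA b p.2 p.1 stone
def pvFStep (stone : Int) (st : List (List Int) × List (List (List Int))) (p : Int × Int) :
    List (List Int) × List (List (List Int)) :=
  let b' := pvSetA st.1 p.2 p.1 stone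
  (b', st.2 ++ [b'])

-- B's per-direction flip run, computed on the original board
def pvFlips (board : List (List Int)) (stone x y W H : Int) (d : Int × Int) : List (Int × Int) :=
  let cells := pvCellsOf x y d.1 d.2 (pvSteps x y W H d.1 d.2)
  let t := pvRunLen board (3 - stone) cells
  if 0 < t ∧ t < cells.length ∧
      pvCellA board (cells.getD t (0, 0)).2 (cells.getD t (0, 0)).1 = stone then
    cells.take t
  else []

-- the tail [(x+k*dx, y+k*dy) for k in range(j, steps+1)] of a ray
def pvSeg (x y dx dy steps j : Int) : List (Int × Int) :=
  (PySem.List.pyRange j (steps + 1) 1).map (fun k => (x + k * dx, y + k * dy))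

theorem pvCellB_eq : pvCellB = pvCellA := rfl
theorem pvSetB_eq : pvSetB = pvSetA := rfl
theorem pvCellsOf_eq_seg (x y dx dy steps : Int) :
    pvCellsOf x y dx dy steps = pvSeg x y dx dy steps 1 := rfl

theorem pvGetD_row (b : List (List Int)) (W H j : Int) (hs : pvShape b W H)
    (hj : 0 ≤ j) (hj2 : j < H) : PySem.List.pyGetD b j [] = b.getD j.toNat [] := by
  obtain ⟨hH, hW⟩ := hs
  have hjn : j.toNat < b.length := by omega
  rw [PySem.List.pyGetD_eq_getElem b ([]:List Int) hj (by omega), List.getD_eq_getElem _ _ hjn]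

theorem pvRow_len (b : List (List Int)) (W H j : Int) (hs : pvShape b W H)
    (hj : 0 ≤ j) (hj2 : j < H) : ((b.getD j.toNat []).length : Int) = W := by
  obtain ⟨hH, hW⟩ := hs
  have hjn : j.toNat < b.length := by omega
  exact hW _ (by rw [List.getD_eq_getElem _ _ hjn]; exact List.getElem_mem hjn)

theorem pvCellA_in (b : List (List Int)) (W H j i : Int) (hs : pvShape b W H)
    (hj : 0 ≤ j) (hj2 : j < H) (hi : 0 ≤ i) (hi2 : i < W) :
    pvCellA b j i = (b.getD j.toNat []).getD i.toNat 0 := by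
  have hrow := pvRow_len b W H j hs hj hj2
  have hin : i.toNat < (b.getD j.toNat []).length := by omega
  rw [pvCellA, pvGetD_row b W H j hs hj hj2,
    PySem.List.pyGetD_eq_getElem _ (0:Int) hi (by omega), List.getD_eq_getElem _ _ hin]

theorem pvPySetD_of_nonneg {α : Type} (xs : List α) (i : Int) (v : α) (h0 : 0 ≤ i)
    (h1 : i < (xs.length : Int)) : PySem.List.pySetD xs i v = xs.set i.toNat v := by
  have e : i = ((i.toNat : Nat) : Int) := by omega
  rw [e, PySem.List.pySetD, PySem.List.pySet?_natCast _ _ _ (by omega)]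
  rfl

theorem pvSetA_nonneg (b : List (List Int)) (j i v : Int) (hj : 0 ≤ j) (hj2 : j < (b.length : Int))
    (hi : 0 ≤ i) (hi2 : i < ((b.getD j.toNat []).length : Int)) :
    pvSetA b j i v = b.set j.toNat ((b.getD j.toNat []).set i.toNat v) := by
  have hrow : PySem.List.pyGetD b j [] = b.getD j.toNat [] := by
    rw [PySem.List.pyGetD_eq_getElem b ([] : List Int) hj (by omega),
      List.getD_eq_getElem _ _ (by omega)]
  rw [pvSetA, hrow, pvPySetD_of_nonneg (b.getD j.toNat []) i v hi hi2,
    pvPySetD_of_nonneg b j _ hj hj2]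

theorem pvShape_set (b : List (List Int)) (W H j i v : Int) (hs : pvShape b W H)
    (hj : 0 ≤ j) (hj2 : j < H) (hi : 0 ≤ i) (hi2 : i < W) :
    pvShape (pvSetA b j i v) W H := by
  have hrow := pvRow_len b W H j hs hj hj2
  rw [pvSetA_nonneg b j i v hj (by obtain ⟨hH, _⟩ := hs; omega) hi (by omega)]
  obtain ⟨hH, hW⟩ := hs
  constructor
  · simp [pvSetA, hH]
  · intro row hr
    rcases List.mem_or_eq_of_mem_set hr with h | h
    · exact hW row h
    · subst h; simpa using hrow

theorem pvCellA_set_ne (b : List (List Int)) (W H j i j' i' v : Int) (hs : pvShape b W H)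
    (hj : 0 ≤ j) (hj2 : j < H) (hi : 0 ≤ i) (hi2 : i < W)
    (hj' : 0 ≤ j') (hj2' : j' < H) (hi' : 0 ≤ i') (hi2' : i' < W)
    (hne : ¬ (i' = i ∧ j' = j)) :
    pvCellA (pvSetA b j i v) j' i' = pvCellA b j' i' := by
  have hrow := pvRow_len b W H j hs hj hj2
  have hrow' := pvRow_len b W H j' hs hj' hj2'
  have hs' := pvShape_set b W H j i v hs hj hj2 hi hi2
  rw [pvCellA_in _ W H j' i' hs' hj' hj2' hi' hi2', pvCellA_in b W H j' i' hs hj' hj2' hi' hi2']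
  have hjn : j.toNat < b.length := by obtain ⟨hH, _⟩ := hs; omega
  have hjn' : j'.toNat < b.length := by obtain ⟨hH, _⟩ := hs; omega
  rw [pvSetA_nonneg b j i v hj (by omega) hi (by omega)]
  by_cases hjj : j' = j
  · subst hjj
    have hii : i'.toNat ≠ i.toNat := by omega
    have hin' : i'.toNat < (b.getD j'.toNat []).length := by omega
    have hin1 : i'.toNat < b[j'.toNat].length := by
      have e : b[j'.toNat]?.getD ([]:List Int) = b[j'.toNat] := by
        rw [List.getElem?_eq_getElem hjn']; rfl
      simpa [List.getD_eq_getElem _ _ hjn', e] using hin'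
    have hin2 : i'.toNat < (b[j'.toNat].set i.toNat v).length := by simpa using hin1
    simp [pvSetA, List.getD_eq_getElem, hjn']
    rw [List.getElem?_eq_getElem hin2, List.getElem?_eq_getElem hin1, Option.getD_some,
      Option.getD_some, List.getElem_set_ne (by omega)]
  · have : j'.toNat ≠ j.toNat := by omega
    simp [pvSetA, List.getD_eq_getElem, hjn', List.getElem_set_ne (Ne.symm this)]

theorem pvSeg_nil (x y dx dy steps j : Int) (h : steps < j) : pvSeg x y dx dy steps j = [] := by
  rw [pvSeg, PySem.List.pyRange_one_eq_nil (by omega)]; rfl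

theorem pvSeg_cons (x y dx dy steps j : Int) (h : j ≤ steps) :
    pvSeg x y dx dy steps j = (x + j * dx, y + j * dy) :: pvSeg x y dx dy steps (j + 1) := by
  rw [pvSeg, PySem.List.pyRange_one_cons (by omega)]; rfl

theorem pvSeg_mem (x y dx dy steps j : Int) (p : Int × Int) :
    p ∈ pvSeg x y dx dy steps j ↔ ∃ k : Int, j ≤ k ∧ k ≤ steps ∧ p = (x + k * dx, y + k * dy) := by
  simp only [pvSeg, List.mem_map, PySem.List.mem_pyRange_one]
  constructor
  · rintro ⟨k, ⟨h1, h2⟩, rfl⟩; exact ⟨k, h1, by omega, rfl⟩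
  · rintro ⟨k, h1, h2, rfl⟩; exact ⟨k, ⟨h1, by omega⟩, rfl⟩

theorem pvSeg_length (x y dx dy steps j : Int) :
    (pvSeg x y dx dy steps j).length = (steps + 1 - j).toNat := by
  simp [pvSeg, PySem.List.length_pyRange_one]

theorem pvSeg_getD (x y dx dy steps j : Int) (t : Nat) (h : t < (steps + 1 - j).toNat) :
    (pvSeg x y dx dy steps j).getD t (0, 0) = (x + (j + t) * dx, y + (j + t) * dy) := by
  have hl : t < (pvSeg x y dx dy steps j).length := by rw [pvSeg_length]; omega
  rw [List.getD_eq_getElem _ _ hl]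
  simp only [pvSeg, List.getElem_map, PySem.List.getElem_pyRange_one]

theorem pvRunLen_le (b : List (List Int)) (opp : Int) (l : List (Int × Int)) :
    pvRunLen b opp l ≤ l.length := by
  induction l with
  | nil => simp [pvRunLen]
  | cons c rest ih => by_cases h : pvCellA b c.2 c.1 = opp <;> simp [pvRunLen, pvCellB_eq, h] <;> omega

theorem pvRunLen_congr (b b' : List (List Int)) (opp : Int) (l : List (Int × Int))
    (h : ∀ p ∈ l, pvCellA b p.2 p.1 = pvCellA b' p.2 p.1) :
    pvRunLen b opp l = pvRunLen b' opp l := by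
  induction l with
  | nil => rfl
  | cons c rest ih =>
    have hc := h c (by simp)
    by_cases hx : pvCellA b' c.2 c.1 = opp
    · simp [pvRunLen, pvCellB_eq, hc, hx, ih (fun p hp => h p (by simp [hp]))]
    · simp [pvRunLen, pvCellB_eq, hc, hx]

theorem pvSteps_nonneg (x y W H dx dy : Int) (hd : pvDirOK (dx, dy))
    (hx : 0 ≤ x) (hx2 : x < W) (hy : 0 ≤ y) (hy2 : y < H) :
    0 ≤ pvSteps x y W H dx dy := by
  obtain ⟨h1, h2, h3⟩ := hd
  simp only at h1 h2
  rcases h1 with rfl | rfl | rfl <;> rcases h2 with rfl | rfl | rfl <;>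
    simp [pvSteps, pvRayLen] <;> omega

theorem pvSteps_le (x y W H dx dy : Int) (hd : pvDirOK (dx, dy))
    (hx : 0 ≤ x) (hx2 : x < W) (hy : 0 ≤ y) (hy2 : y < H) :
    pvSteps x y W H dx dy ≤ W + H := by
  obtain ⟨h1, h2, h3⟩ := hd
  simp only at h1 h2
  rcases h1 with rfl | rfl | rfl <;> rcases h2 with rfl | rfl | rfl <;>
    simp [pvSteps, pvRayLen] <;> omega

theorem pvSteps_inb (x y W H dx dy : Int) (hd : pvDirOK (dx, dy))
    (hx : 0 ≤ x) (hx2 : x < W) (hy : 0 ≤ y) (hy2 : y < H) :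
    ∀ k : Int, 1 ≤ k →
      ((k ≤ pvSteps x y W H dx dy) ↔
        (0 ≤ x + k * dx ∧ x + k * dx < W ∧ 0 ≤ y + k * dy ∧ y + k * dy < H)) := by
  obtain ⟨h1, h2, h3⟩ := hd
  simp only at h1 h2
  intro k hk
  rcases h1 with rfl | rfl | rfl <;> rcases h2 with rfl | rfl | rfl <;>
    simp_all [pvSteps, pvRayLen] <;> omega

theorem pvRay_ne_center (x y : Int) (d : Int × Int) (hd : pvDirOK d) (k : Int) (hk : 1 ≤ k) :
    (x + k * d.1, y + k * d.2) ≠ (x, y) := by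
  obtain ⟨h1, h2, h3⟩ := hd
  obtain ⟨dx, dy⟩ := d
  simp only [Prod.mk.injEq, ne_eq, not_and] at *
  rcases h1 with rfl | rfl | rfl <;> rcases h2 with rfl | rfl | rfl <;> intro hx <;> omega

theorem pvRay_disjoint (x y : Int) (d d' : Int × Int) (hd : pvDirOK d) (hd' : pvDirOK d')
    (hne : d ≠ d') (k j : Int) (hk : 1 ≤ k) (hj : 1 ≤ j) :
    (x + k * d.1, y + k * d.2) ≠ (x + j * d'.1, y + j * d'.2) := by
  obtain ⟨h1, h2, h3⟩ := hd
  obtain ⟨h1', h2', h3'⟩ := hd'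
  obtain ⟨dx, dy⟩ := d
  obtain ⟨dx', dy'⟩ := d'
  simp only [Prod.mk.injEq, ne_eq, not_and] at *
  rcases h1 with rfl | rfl | rfl <;> rcases h2 with rfl | rfl | rfl <;>
    rcases h1' with rfl | rfl | rfl <;> rcases h2' with rfl | rfl | rfl <;>
      intro hx <;> omega

theorem walk_collect_eq (b : List (List Int)) (W H opp dx dy x y steps : Int)
    (hinb : ∀ k : Int, 1 ≤ k →
      ((k ≤ steps) ↔ (0 ≤ x + k * dx ∧ x + k * dx < W ∧ 0 ≤ y + k * dy ∧ y + k * dy < H))) :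
    ∀ (fuel : Nat) (j : Int), 1 ≤ j → steps + 2 ≤ j + fuel →
    pvWalkCollect b W H opp dx dy (x + j * dx) (y + j * dy) fuel =
      ((pvSeg x y dx dy steps j).take (pvRunLen b opp (pvSeg x y dx dy steps j)),
        x + (j + (pvRunLen b opp (pvSeg x y dx dy steps j) : Int)) * dx,
        y + (j + (pvRunLen b opp (pvSeg x y dx dy steps j) : Int)) * dy) := by
  intro fuel
  induction fuel with
  | zero =>
    intro j hj hf
    rw [pvSeg_nil x y dx dy steps j (by omega)]
    simp [pvWalkCollect, pvRunLen]
  | succ n ih =>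
    intro j hj hf
    by_cases hjs : j ≤ steps
    · rw [pvSeg_cons x y dx dy steps j hjs]
      have hb : (0 ≤ x + j * dx ∧ x + j * dx < W ∧ 0 ≤ y + j * dy ∧ y + j * dy < H) :=
        (hinb j hj).mp hjs
      by_cases hc : pvCellA b (y + j * dy) (x + j * dx) = opp
      · have := ih (j + 1) (by omega) (by omega)
        rw [pvWalkCollect, if_pos ⟨hb.1, hb.2.1, hb.2.2.1, hb.2.2.2, hc⟩]
        have harg1 : x + j * dx + dx = x + (j + 1) * dx := by ring
        have harg2 : y + j * dy + dy = y + (j + 1) * dy := by ring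
        rw [harg1, harg2, this]
        simp only [pvRunLen, pvCellB_eq, hc, if_pos, List.take_succ_cons, Prod.mk.injEq]
        refine ⟨trivial, by push_cast; ring, by push_cast; ring⟩
      · rw [pvWalkCollect, if_neg (by tauto)]
        simp [pvRunLen, pvCellB_eq, hc]
    · rw [pvSeg_nil x y dx dy steps j (by omega)]
      have hb : ¬ (0 ≤ x + j * dx ∧ x + j * dx < W ∧ 0 ≤ y + j * dy ∧ y + j * dy < H) := by
        intro h; exact hjs ((hinb j hj).mpr h)
      rw [pvWalkCollect, if_neg (by tauto)]
      simp [pvRunLen]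

theorem walk_check_eq (b : List (List Int)) (W H opp dx dy x y steps : Int)
    (hinb : ∀ k : Int, 1 ≤ k →
      ((k ≤ steps) ↔ (0 ≤ x + k * dx ∧ x + k * dx < W ∧ 0 ≤ y + k * dy ∧ y + k * dy < H))) :
    ∀ (fuel : Nat) (j : Int) (f : Bool), 1 ≤ j → steps + 2 ≤ j + fuel →
    pvWalkCheck b W H opp dx dy (x + j * dx) (y + j * dy) f fuel =
      ((f || decide (0 < pvRunLen b opp (pvSeg x y dx dy steps j))),
        x + (j + (pvRunLen b opp (pvSeg x y dx dy steps j) : Int)) * dx,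
        y + (j + (pvRunLen b opp (pvSeg x y dx dy steps j) : Int)) * dy) := by
  intro fuel
  induction fuel with
  | zero =>
    intro j f hj hf
    rw [pvSeg_nil x y dx dy steps j (by omega)]
    simp [pvWalkCheck, pvRunLen]
  | succ n ih =>
    intro j f hj hf
    by_cases hjs : j ≤ steps
    · rw [pvSeg_cons x y dx dy steps j hjs]
      have hb := (hinb j hj).mp hjs
      by_cases hc : pvCellA b (y + j * dy) (x + j * dx) = opp
      · have := ih (j + 1) true (by omega) (by omega)
        rw [pvWalkCheck, if_pos ⟨hb.1, hb.2.1, hb.2.2.1, hb.2.2.2, hc⟩]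
        have harg1 : x + j * dx + dx = x + (j + 1) * dx := by ring
        have harg2 : y + j * dy + dy = y + (j + 1) * dy := by ring
        rw [harg1, harg2, this]
        simp only [pvRunLen, pvCellB_eq, hc, if_pos, Prod.mk.injEq]
        refine ⟨by simp, by push_cast; ring, by push_cast; ring⟩
      · rw [pvWalkCheck, if_neg (by tauto)]
        simp [pvRunLen, pvCellB_eq, hc]
    · rw [pvSeg_nil x y dx dy steps j (by omega)]
      have hb : ¬ (0 ≤ x + j * dx ∧ x + j * dx < W ∧ 0 ≤ y + j * dy ∧ y + j * dy < H) := by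
        intro h; exact hjs ((hinb j hj).mpr h)
      rw [pvWalkCheck, if_neg (by tauto)]
      simp [pvRunLen]


-- shape of a rectangular W×H board (W H as Int for arithmetic)

-- A's per-direction fold step (definitionally the lambda inside move_stone's fold)
def pvAStep (stone x y : Int) (st : List (List Int) × List (List (List Int))) (d : Int × Int) :
    List (List Int) × List (List (List Int)) :=
  let w : Int := (PySem.List.pyGetD st.1 0 ([] : List Int)).length
  let h : Int := st.1.length
  let r := pvWalkCollect st.1 w h (3 - stone) d.1 d.2 (x + d.1) (y + d.2) (pvFuel st.1)
  if r.1 ≠ [] ∧ 0 ≤ r.2.1 ∧ r.2.1 < w ∧ 0 ≤ r.2.2 ∧ r.2.2 < h ∧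
      pvCellA st.1 r.2.2 r.2.1 = stone then
    r.1.foldl (fun st2 p =>
      let b' := pvSetA st2.1 p.2 p.1 stone
      (b', st2.2 ++ [b'])) st
  else st

theorem pvFStep_fst (stone : Int) (l : List (Int × Int))
    (st : List (List Int) × List (List (List Int))) :
    (l.foldl (pvFStep stone) st).1 = l.foldl (pvBStep stone) st.1 := by
  induction l generalizing st with
  | nil => rfl
  | cons p rest ih => simpa [pvFStep, pvBStep] using ih _

theorem pvShape_foldl_set (stone W H : Int) (l : List (Int × Int)) (b : List (List Int))
    (hs : pvShape b W H) (hl : ∀ q ∈ l, pvInB W H q) :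
    pvShape (l.foldl (pvBStep stone) b) W H := by
  induction l generalizing b with
  | nil => exact hs
  | cons q rest ih =>
    have hq := hl q (by simp)
    exact ih _ (pvShape_set b W H q.2 q.1 stone hs hq.2.2.1 hq.2.2.2 hq.1 hq.2.1)
      (fun p hp => hl p (by simp [hp]))

theorem pvCellA_foldl_ne (stone W H : Int) (l : List (Int × Int)) (b : List (List Int))
    (p : Int × Int) (hs : pvShape b W H) (hp : pvInB W H p)
    (hl : ∀ q ∈ l, pvInB W H q ∧ q ≠ p) :
    pvCellA (l.foldl (pvBStep stone) b) p.2 p.1 = pvCellA b p.2 p.1 := by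
  induction l generalizing b with
  | nil => rfl
  | cons q rest ih =>
    have hq := hl q (by simp)
    have h1 : pvCellA (pvSetA b q.2 q.1 stone) p.2 p.1 = pvCellA b p.2 p.1 := by
      apply pvCellA_set_ne b W H q.2 q.1 p.2 p.1 stone hs hq.1.2.2.1 hq.1.2.2.2 hq.1.1 hq.1.2.1
        hp.2.2.1 hp.2.2.2 hp.1 hp.2.1
      intro hcc
      exact hq.2 (by obtain ⟨q1, q2⟩ := q; obtain ⟨p1, p2⟩ := p; simp at hcc ⊢; omega)
    rw [List.foldl_cons]
    rw [ih (pvBStep stone b q) (pvShape_set b W H q.2 q.1 stone hs hq.1.2.2.1 hq.1.2.2.2 hq.1.1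
      hq.1.2.1) (fun r hr => hl r (by simp [hr]))]
    exact h1

theorem pvFlips_mem (board : List (List Int)) (stone x y W H : Int) (d : Int × Int)
    (q : Int × Int) (hq : q ∈ pvFlips board stone x y W H d) :
    ∃ k : Int, 1 ≤ k ∧ k ≤ pvSteps x y W H d.1 d.2 ∧ q = (x + k * d.1, y + k * d.2) := by
  rw [pvFlips] at hq
  split at hq
  · have : q ∈ pvCellsOf x y d.1 d.2 (pvSteps x y W H d.1 d.2) := List.mem_of_mem_take hq
    rw [pvCellsOf_eq_seg, pvSeg_mem] at this
    obtain ⟨k, h1, h2, h3⟩ := this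
    exact ⟨k, h1, h2, h3⟩
  · simp at hq

theorem pvDims (b : List (List Int)) (W H : Int) (hs : pvShape b W H) (hH : 0 < H) :
    ((PySem.List.pyGetD b 0 ([] : List Int)).length : Int) = W ∧ ((b.length : Int) = H) := by
  refine ⟨?_, hs.1⟩
  rw [pvGetD_row b W H 0 hs le_rfl hH]
  exact pvRow_len b W H 0 hs le_rfl hH

theorem pvAStep_eq (board : List (List Int)) (stone x y W H : Int) (d : Int × Int)
    (hd : pvDirOK d) (hx : 0 ≤ x) (hx2 : x < W) (hy : 0 ≤ y) (hy2 : y < H)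
    (st : List (List Int) × List (List (List Int))) (hsb : pvShape st.1 W H)
    (hagree : ∀ k : Int, 1 ≤ k → k ≤ pvSteps x y W H d.1 d.2 →
      pvCellA st.1 (y + k * d.2) (x + k * d.1) = pvCellA board (y + k * d.2) (x + k * d.1)) :
    pvAStep stone x y st d = (pvFlips board stone x y W H d).foldl (pvFStep stone) st := by
  have hH : 0 < H := by omega
  obtain ⟨hw, hh⟩ := pvDims st.1 W H hsb hH
  have hinb := pvSteps_inb x y W H d.1 d.2 hd hx hx2 hy hy2
  have hsle := pvSteps_le x y W H d.1 d.2 hd hx hx2 hy hy2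
  have hsnn := pvSteps_nonneg x y W H d.1 d.2 hd hx hx2 hy hy2
  have hfuel : (pvFuel st.1 : Int) = H + W + 2 := by
    rw [pvFuel]; push_cast; omega
  have hwalk := walk_collect_eq st.1 W H (3 - stone) d.1 d.2 x y
    (pvSteps x y W H d.1 d.2) hinb (pvFuel st.1) 1 le_rfl (by omega)
  set steps := pvSteps x y W H d.1 d.2 with hsteps
  set S := pvSeg x y d.1 d.2 steps 1 with hSdef
  have hSmem : ∀ p ∈ S, pvCellA st.1 p.2 p.1 = pvCellA board p.2 p.1 := by
    intro p hp
    rw [hSdef, pvSeg_mem] at hp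
    obtain ⟨k, h1, h2, rfl⟩ := hp
    exact hagree k h1 h2
  have htb : pvRunLen st.1 (3 - stone) S = pvRunLen board (3 - stone) S :=
    pvRunLen_congr _ _ _ _ hSmem
  set t := pvRunLen board (3 - stone) S with htdef
  have hlen : S.length = steps.toNat := by
    rw [hSdef, pvSeg_length]
    congr 1
    omega
  have htle : t ≤ S.length := by rw [← htb]; exact pvRunLen_le _ _ _
  have hgd : t < S.length → S.getD t (0, 0) = (x + (1 + (t : Int)) * d.1, y + (1 + (t : Int)) * d.2) := by
    intro hlt
    rw [hSdef, pvSeg_getD x y d.1 d.2 steps 1 t (by omega)]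
  have hiff : (¬ S.take t = [] ∧ 0 ≤ x + (1 + (t : Int)) * d.1 ∧ x + (1 + (t : Int)) * d.1 < W ∧
        0 ≤ y + (1 + (t : Int)) * d.2 ∧ y + (1 + (t : Int)) * d.2 < H ∧
        pvCellA st.1 (y + (1 + (t : Int)) * d.2) (x + (1 + (t : Int)) * d.1) = stone) ↔
      (0 < t ∧ t < S.length ∧
        pvCellA board (S.getD t (0, 0)).2 (S.getD t (0, 0)).1 = stone) := by
    constructor
    · rintro ⟨h1, h2, h3, h4, h5, h6⟩
      have ht0 : 0 < t := by
        rcases Nat.eq_zero_or_pos t with h | h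
        · exact absurd (by simp [h]) h1
        · exact h
      have hks : 1 + (t : Int) ≤ steps := (hinb (1 + t) (by omega)).mpr ⟨h2, h3, h4, h5⟩
      have hts : t < S.length := by omega
      refine ⟨ht0, hts, ?_⟩
      rw [hgd hts]
      simp only
      rw [← hagree (1 + t) (by omega) hks]
      exact h6
    · rintro ⟨h1, h2, h3⟩
      have hks : 1 + (t : Int) ≤ steps := by omega
      have hb := (hinb (1 + t) (by omega)).mp hks
      refine ⟨?_, hb.1, hb.2.1, hb.2.2.1, hb.2.2.2, ?_⟩
      · intro hnil
        rw [List.take_eq_nil_iff] at hnil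
        rcases hnil with h | h
        · omega
        · rw [h] at h2; simp at h2
      · rw [hagree (1 + t) (by omega) hks]
        rw [hgd h2] at h3
        exact h3
  simp only [pvAStep]
  rw [hw, hh]
  have e1 : x + d.1 = x + 1 * d.1 := by ring
  have e2 : y + d.2 = y + 1 * d.2 := by ring
  rw [e1, e2, hwalk]
  rw [htb, pvFlips, pvCellsOf_eq_seg, ← hsteps, ← hSdef]
  by_cases hc : (0 < t ∧ t < S.length ∧
      pvCellA board (S.getD t (0, 0)).2 (S.getD t (0, 0)).1 = stone)
  · rw [if_pos hc, if_pos (by simpa using hiff.mpr hc)]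
    rfl
  · rw [if_neg hc, if_neg (by simpa using fun h => hc (hiff.mp h))]
    rfl

theorem pvFold_eq (board : List (List Int)) (stone x y W H : Int)
    (hx : 0 ≤ x) (hx2 : x < W) (hy : 0 ≤ y) (hy2 : y < H) :
    ∀ (ds : List (Int × Int)), (∀ d ∈ ds, pvDirOK d) → ds.Pairwise (· ≠ ·) →
    ∀ st : List (List Int) × List (List (List Int)), pvShape st.1 W H →
    (∀ d ∈ ds, ∀ k : Int, 1 ≤ k → k ≤ pvSteps x y W H d.1 d.2 →
      pvCellA st.1 (y + k * d.2) (x + k * d.1) = pvCellA board (y + k * d.2) (x + k * d.1)) →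
    ds.foldl (pvAStep stone x y) st =
      (ds.flatMap (pvFlips board stone x y W H)).foldl (pvFStep stone) st := by
  intro ds
  induction ds with
  | nil => intro _ _ st _ _; rfl
  | cons d rest ih =>
    intro hok hpw st hsb hagree
    have hd := hok d (by simp)
    have hflipmem : ∀ q ∈ pvFlips board stone x y W H d, pvInB W H q ∧ pvOnRay x y d q := by
      intro q hq
      obtain ⟨k, h1, h2, rfl⟩ := pvFlips_mem board stone x y W H d q hq
      have hb := (pvSteps_inb x y W H d.1 d.2 hd hx hx2 hy hy2 k h1).mp h2
      exact ⟨⟨hb.1, hb.2.1, hb.2.2.1, hb.2.2.2⟩, ⟨k, h1, rfl⟩⟩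
    rw [List.foldl_cons, List.flatMap_cons, List.foldl_append]
    rw [pvAStep_eq board stone x y W H d hd hx hx2 hy hy2 st hsb (hagree d (by simp))]
    have hsb' : pvShape ((pvFlips board stone x y W H d).foldl (pvFStep stone) st).1 W H := by
      rw [pvFStep_fst]
      exact pvShape_foldl_set stone W H _ st.1 hsb (fun q hq => (hflipmem q hq).1)
    apply ih (fun d' h => hok d' (by simp [h])) (List.pairwise_cons.mp hpw).2 _ hsb'
    intro d' hd' k hk hks
    have hdo' := hok d' (by simp [hd'])
    have hdne : d ≠ d' := (List.pairwise_cons.mp hpw).1 d' hd'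
    have hb' := (pvSteps_inb x y W H d'.1 d'.2 hdo' hx hx2 hy hy2 k hk).mp hks
    have hpInB : pvInB W H (x + k * d'.1, y + k * d'.2) :=
      ⟨hb'.1, hb'.2.1, hb'.2.2.1, hb'.2.2.2⟩
    rw [pvFStep_fst]
    have hcell := pvCellA_foldl_ne stone W H (pvFlips board stone x y W H d) st.1
      (x + k * d'.1, y + k * d'.2) hsb hpInB (by
        intro q hq
        obtain ⟨m, hm1, hm2, rfl⟩ := pvFlips_mem board stone x y W H d q hq
        refine ⟨((hflipmem _ hq).1), ?_⟩
        exact pvRay_disjoint x y d d' hd hdo' hdne m k hm1 hk)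
    simp only at hcell
    rw [hcell]
    exact hagree d' (by simp [hd']) k hk hks

theorem pvDirs_ok : ∀ d ∈ pvDirs, pvDirOK d := by
  intro d hd
  fin_cases hd <;> (unfold pvDirOK; decide)

theorem pvDirs_pairwise : pvDirs.Pairwise (· ≠ ·) := by
  unfold pvDirs
  decide

theorem pvFlips_ne_iff (board : List (List Int)) (stone x y W H : Int) (d : Int × Int) :
    pvFlips board stone x y W H d ≠ [] ↔
      (0 < pvRunLen board (3 - stone) (pvCellsOf x y d.1 d.2 (pvSteps x y W H d.1 d.2)) ∧
        pvRunLen board (3 - stone) (pvCellsOf x y d.1 d.2 (pvSteps x y W H d.1 d.2)) <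
          (pvCellsOf x y d.1 d.2 (pvSteps x y W H d.1 d.2)).length ∧
        pvCellA board
          ((pvCellsOf x y d.1 d.2 (pvSteps x y W H d.1 d.2)).getD
            (pvRunLen board (3 - stone) (pvCellsOf x y d.1 d.2 (pvSteps x y W H d.1 d.2))) (0, 0)).2
          ((pvCellsOf x y d.1 d.2 (pvSteps x y W H d.1 d.2)).getD
            (pvRunLen board (3 - stone) (pvCellsOf x y d.1 d.2 (pvSteps x y W H d.1 d.2))) (0, 0)).1
          = stone) := by
  rw [pvFlips]
  split_ifs with hc
  · refine iff_of_true ?_ hc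
    simp only [ne_eq, List.take_eq_nil_iff, not_or]
    refine ⟨by omega, ?_⟩
    intro h
    rw [h] at hc
    simp at hc
  · exact iff_of_false (by simp) hc

theorem can_place_iff (board : List (List Int)) (stone x y W H : Int)
    (hx : 0 ≤ x) (hx2 : x < W) (hy : 0 ≤ y) (hy2 : y < H) (hsB : pvShape board W H) :
    can_place_x_y board stone x y = true ↔
      (pvCellA board y x = 0 ∧ ∃ d ∈ pvDirs, pvFlips board stone x y W H d ≠ []) := by
  have hH : 0 < H := by omega
  obtain ⟨hw, hh⟩ := pvDims board W H hsB hH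
  simp only [can_place_x_y]
  by_cases h0 : pvCellA board y x ≠ 0
  · rw [if_pos h0]
    simp [h0]
  · rw [if_neg h0]
    push_neg at h0
    simp only [h0, List.any_eq_true, true_and]
    constructor
    · rintro ⟨d, hdm, hf⟩
      refine ⟨d, hdm, ?_⟩
      have hd : pvDirOK d := pvDirs_ok d hdm
      have hinb := pvSteps_inb x y W H d.1 d.2 hd hx hx2 hy hy2
      have hsle := pvSteps_le x y W H d.1 d.2 hd hx hx2 hy hy2
      have hsnn := pvSteps_nonneg x y W H d.1 d.2 hd hx hx2 hy hy2
      have hfuel : (pvFuel board : Int) = H + W + 2 := by rw [pvFuel]; push_cast; omega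
      have hwalk := walk_check_eq board W H (3 - stone) d.1 d.2 x y
        (pvSteps x y W H d.1 d.2) hinb (pvFuel board) 1 false le_rfl (by omega)
      set steps := pvSteps x y W H d.1 d.2 with hsteps
      set S := pvSeg x y d.1 d.2 steps 1 with hSdef
      set t := pvRunLen board (3 - stone) S with htdef
      have hlen : S.length = steps.toNat := by rw [hSdef, pvSeg_length]; congr 1; omega
      have htle : t ≤ S.length := by rw [htdef]; exact pvRunLen_le _ _ _
      have hgd : t < S.length →
          S.getD t (0, 0) = (x + (1 + (t : Int)) * d.1, y + (1 + (t : Int)) * d.2) := by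
        intro hlt
        rw [hSdef, pvSeg_getD x y d.1 d.2 steps 1 t (by omega)]
      have e1 : x + d.1 = x + 1 * d.1 := by ring
      have e2 : y + d.2 = y + 1 * d.2 := by ring
      rw [hw, hh, e1, e2, hwalk] at hf
      simp only [Bool.false_or, Bool.and_eq_true, decide_eq_true_eq] at hf
      obtain ⟨h1, h2, h3, h4, h5, h6⟩ := hf
      have hks : 1 + (t : Int) ≤ steps := (hinb (1 + t) (by omega)).mpr ⟨h2, h3, h4, h5⟩
      have hts : t < S.length := by omega
      rw [pvFlips_ne_iff, pvCellsOf_eq_seg, ← hsteps, ← hSdef, ← htdef]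
      refine ⟨h1, hts, ?_⟩
      rw [hgd hts]
      simpa using h6
    · rintro ⟨d, hdm, hf⟩
      refine ⟨d, hdm, ?_⟩
      have hd : pvDirOK d := pvDirs_ok d hdm
      have hinb := pvSteps_inb x y W H d.1 d.2 hd hx hx2 hy hy2
      have hsle := pvSteps_le x y W H d.1 d.2 hd hx hx2 hy hy2
      have hsnn := pvSteps_nonneg x y W H d.1 d.2 hd hx hx2 hy hy2
      have hfuel : (pvFuel board : Int) = H + W + 2 := by rw [pvFuel]; push_cast; omega
      have hwalk := walk_check_eq board W H (3 - stone) d.1 d.2 x y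
        (pvSteps x y W H d.1 d.2) hinb (pvFuel board) 1 false le_rfl (by omega)
      set steps := pvSteps x y W H d.1 d.2 with hsteps
      set S := pvSeg x y d.1 d.2 steps 1 with hSdef
      set t := pvRunLen board (3 - stone) S with htdef
      have hlen : S.length = steps.toNat := by rw [hSdef, pvSeg_length]; congr 1; omega
      have htle : t ≤ S.length := by rw [htdef]; exact pvRunLen_le _ _ _
      have hgd : t < S.length →
          S.getD t (0, 0) = (x + (1 + (t : Int)) * d.1, y + (1 + (t : Int)) * d.2) := by
        intro hlt
        rw [hSdef, pvSeg_getD x y d.1 d.2 steps 1 t (by omega)]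
      have e1 : x + d.1 = x + 1 * d.1 := by ring
      have e2 : y + d.2 = y + 1 * d.2 := by ring
      rw [pvFlips_ne_iff, pvCellsOf_eq_seg, ← hsteps, ← hSdef, ← htdef] at hf
      obtain ⟨h1, h2, h3⟩ := hf
      have hks : 1 + (t : Int) ≤ steps := by omega
      have hb := (hinb (1 + t) (by omega)).mp hks
      rw [hw, hh, e1, e2, hwalk]
      simp only [Bool.false_or, Bool.and_eq_true, decide_eq_true_eq]
      refine ⟨h1, hb.1, hb.2.1, hb.2.2.1, hb.2.2.2, ?_⟩
      rw [hgd h2] at h3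
      simpa using h3

theorem pvToFlip_fold (board : List (List Int)) (stone x y W H : Int) :
    ∀ (ds : List (Int × Int)) (acc : List (Int × Int)),
    ds.foldl (fun acc d =>
      let cells := pvCellsOf x y d.1 d.2 (pvSteps x y W H d.1 d.2)
      let t := pvRunLen board (3 - stone) cells
      if 0 < t ∧ t < cells.length ∧
          pvCellB board (cells.getD t (0, 0)).2 (cells.getD t (0, 0)).1 = stone then
        acc ++ cells.take t
      else acc) acc = acc ++ ds.flatMap (pvFlips board stone x y W H) := by
  intro ds
  induction ds with
  | nil => intro acc; simp
  | cons d rest ih =>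
    intro acc
    rw [List.foldl_cons, List.flatMap_cons, ih]
    simp only [pvCellB_eq]
    rw [pvFlips]
    split_ifs with hc
    · simp
    · simp

theorem move_stone_spec : Claim_equal_move_stone := by
  unfold Claim_equal_move_stone
  intro board stone x y hdom hpre
  obtain ⟨hyr, hxr, hcase⟩ := hpre
  unfold Spec_move_stone
  rcases hcase with hocc | ⟨hrect, hx, hx2, hy, hy2⟩
  · -- occupied target: both programs return the three untouched copies
    have h0 : pvCellA board y x ≠ 0 := hocc
    have hcp : can_place_x_y board stone x y = false := by
      simp only [can_place_x_y]
      rw [if_pos h0]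
    have hA : move_stone board stone x y = [board, board, board] := by
      have : move_stone board stone x y =
          (if ¬ can_place_x_y board stone x y then [board, board, board]
           else (pvDirs.foldl (pvAStep stone x y)
             (pvSetA board y x stone, [board, board, board] ++ [pvSetA board y x stone])).2) := rfl
      rw [this, if_pos (by simp [hcp])]
    have hB : move_stone_alt board stone x y = [board, board, board] := by
      have : move_stone_alt board stone x y =
          (if pvCellB board y x ≠ 0 then [board, board, board]
           else move_stone_alt board stone x y) := by
        simp only [move_stone_alt]
        rw [if_pos (show pvCellB board y x ≠ 0 from h0)]
        rw [if_pos (show pvCellB board y x ≠ 0 from h0)]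
      rw [this, if_pos (show pvCellB board y x ≠ 0 from h0)]
    rw [hA, hB]
  set W : Int := ((board.headD []).length : Int) with hWdef
  set H : Int := (board.length : Int) with hHdef
  have hsB : pvShape board W H := ⟨rfl, fun row hr => by rw [hrect row hr]⟩
  have hH : 0 < H := by omega
  obtain ⟨hw, hh⟩ := pvDims board W H hsB hH
  have hA : move_stone board stone x y =
      (if ¬ can_place_x_y board stone x y then [board, board, board]
       else (pvDirs.foldl (pvAStep stone x y)
         (pvSetA board y x stone, [board, board, board] ++ [pvSetA board y x stone])).2) := rfl
  have hB : move_stone_alt board stone x y =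
      (if pvCellB board y x ≠ 0 then [board, board, board]
       else
        (if pvDirs.foldl (fun acc d =>
            let cells := pvCellsOf x y d.1 d.2 (pvSteps x y
              ((PySem.List.pyGetD board 0 ([] : List Int)).length : Int)
              ((board.length : Nat) : Int) d.1 d.2)
            let t := pvRunLen board (3 - stone) cells
            if 0 < t ∧ t < cells.length ∧
                pvCellB board (cells.getD t (0, 0)).2 (cells.getD t (0, 0)).1 = stone then
              acc ++ cells.take t
            else acc) [] = [] then [board, board, board]
         else ((pvDirs.foldl (fun acc d =>
            let cells := pvCellsOf x y d.1 d.2 (pvSteps x y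
              ((PySem.List.pyGetD board 0 ([] : List Int)).length : Int)
              ((board.length : Nat) : Int) d.1 d.2)
            let t := pvRunLen board (3 - stone) cells
            if 0 < t ∧ t < cells.length ∧
                pvCellB board (cells.getD t (0, 0)).2 (cells.getD t (0, 0)).1 = stone then
              acc ++ cells.take t
            else acc) []).foldl (pvFStep stone)
              (pvSetB board y x stone,
                [board, board, board] ++ [pvSetB board y x stone])).2)) := rfl
  rw [hA, hB, pvToFlip_fold board stone x y]
  rw [hw, hh, pvCellB_eq, pvSetB_eq]
  simp only [List.nil_append]
  by_cases h0 : pvCellA board y x ≠ 0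
  · have hcp : can_place_x_y board stone x y = false := by
      simp only [can_place_x_y]
      rw [if_pos h0]
    rw [if_pos (by simp [hcp]), if_pos h0]
  · push_neg at h0
    rw [if_neg (show ¬ (pvCellA board y x ≠ 0) from not_not_intro h0)]
    by_cases hfl : pvDirs.flatMap (pvFlips board stone x y W H) = []
    · have hcp : ¬ (can_place_x_y board stone x y = true) := by
        intro htrue
        rw [can_place_iff board stone x y W H hx hx2 hy hy2 hsB] at htrue
        obtain ⟨-, d, hdm, hdne⟩ := htrue
        exact hdne (List.flatMap_eq_nil_iff.mp hfl d hdm)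
      rw [if_pos hcp, if_pos hfl]
    · have hcp : can_place_x_y board stone x y = true := by
        rw [can_place_iff board stone x y W H hx hx2 hy hy2 hsB]
        refine ⟨h0, ?_⟩
        by_contra hno
        push_neg at hno
        exact hfl (List.flatMap_eq_nil_iff.mpr hno)
      rw [if_neg (by simp [hcp]), if_neg hfl]
      have hb1 : pvShape (pvSetA board y x stone) W H :=
        pvShape_set board W H y x stone hsB hy hy2 hx hx2
      have hagree : ∀ d ∈ pvDirs, ∀ k : Int, 1 ≤ k → k ≤ pvSteps x y W H d.1 d.2 →
          pvCellA (pvSetA board y x stone) (y + k * d.2) (x + k * d.1) =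
            pvCellA board (y + k * d.2) (x + k * d.1) := by
        intro d hdm k hk hks
        have hd := pvDirs_ok d hdm
        have hbnd := (pvSteps_inb x y W H d.1 d.2 hd hx hx2 hy hy2 k hk).mp hks
        apply pvCellA_set_ne board W H y x (y + k * d.2) (x + k * d.1) stone hsB hy hy2 hx hx2
          hbnd.2.2.1 hbnd.2.2.2 hbnd.1 hbnd.2.1
        intro hcc
        have := pvRay_ne_center x y d hd k hk
        simp only [Prod.mk.injEq, ne_eq] at this
        exact this ⟨hcc.1, hcc.2⟩
      rw [pvFold_eq board stone x y W H hx hx2 hy hy2 pvDirs pvDirs_ok pvDirs_pairwise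
        (pvSetA board y x stone, [board, board, board] ++ [pvSetA board y x stone]) hb1 hagree]
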